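-- pv_equiv track=rewrite | github.com/kindjacket/advent_of_code | 2020/day6/star2.py | clean_group_forms
-- ===== SOURCE A (Python) =====
-- import string
--
-- def clean_group_forms(input_data: list[str]):
--     group_inputs = []
--     alphabet = set(list(string.ascii_lowercase))
--     group_intersection = alphabet
--     ### add blank list to the end of the list so logic works smoomthly. A bit of hack
--     input_data.append([])
--     for i in input_data:
--         if len(i) > 0:
--             group_intersection = group_intersection & (set(list(i)))
--         else:
--             ### line break and therefore end of input data
--             group_inputs.append(group_intersection)
--             group_intersection = alphabet
--     return group_inputs
-- ===== SOURCE B (Python) =====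
-- import string
--
--
-- def clean_group_forms(input_data: list[str]):
--     # same sentinel-flush mutation as the original (input_data is mutated)
--     input_data.append([])
--     # pass 1: split into groups of non-empty lines, one group per blank
--     groups = []
--     current = []
--     for line in input_data:
--         if len(line) > 0:
--             current.append(line)
--         else:
--             groups.append(current)
--             current = []
--     # pass 2: intersect each group's letter sets, seeded with the alphabet
--     alphabet = set(string.ascii_lowercase)
--     return [alphabet.intersection(*(set(line) for line in group)) for group in groups]
-- ===== Notes on version B (the rewrite author's own statement) =====
-- stated objective: simpler
-- what changed: Replaces A's single pass carrying a running intersection accumulator that is flushed on blanks by a two-phase decomposition: first split the lines into groups at blank lines, then map each group to alphabet.intersection(*sets) with no mutable intersection state.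
import Mathlib
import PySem

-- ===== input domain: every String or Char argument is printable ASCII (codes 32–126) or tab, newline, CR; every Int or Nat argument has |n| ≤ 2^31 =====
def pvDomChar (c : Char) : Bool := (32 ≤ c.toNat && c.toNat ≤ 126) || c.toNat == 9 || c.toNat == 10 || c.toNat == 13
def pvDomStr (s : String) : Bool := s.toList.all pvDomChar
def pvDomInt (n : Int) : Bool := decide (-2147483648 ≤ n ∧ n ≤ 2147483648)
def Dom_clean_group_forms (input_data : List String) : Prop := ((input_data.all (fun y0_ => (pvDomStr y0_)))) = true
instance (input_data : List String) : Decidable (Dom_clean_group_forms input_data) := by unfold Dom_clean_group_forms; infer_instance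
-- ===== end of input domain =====

-- B changes A's single flushed-accumulator pass into split-into-groups + per-group intersection (simpler
-- decomposition, same cost); like A, the Python B appends a sentinel to input_data (same mutation) — the
-- equivalence here is about the return value.

-- shared literal helpers: set(list(s)) element list, and string.ascii_lowercase
def pvChars (s : String) : List String := s.toList.map (fun c => String.ofList [c])
def pvAlphabet : List String := PySem.Set.ofList (pvChars "abcdefghijklmnopqrstuvwxyz")

-- ===== PORT A =====
-- one pass: running intersection, flushed to the output list on each blank element
def clean_group_forms (input_data : List String) : List (List String) :=
  -- input_data.append([]) : the appended [] has len 0, modelled as the empty string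
  ((input_data ++ [""]).foldl
    (fun (st : List (List String) × List String) i =>
      if PySem.Str.len i > 0 then
        (st.1, PySem.Set.inter st.2 (PySem.Set.ofList (pvChars i)))
      else
        (st.1 ++ [st.2], pvAlphabet))
    ([], pvAlphabet)).1

-- ===== PORT B =====
-- pass 1: split into groups of non-empty lines, one group per blank (leftover current is discarded)
def pvGroups (xs : List String) (current : List String) : List (List String) :=
  match xs with
  | [] => []
  | i :: rest =>
      if PySem.Str.len i > 0 then pvGroups rest (current ++ [i])
      else current :: pvGroups rest []

-- pass 2: alphabet.intersection(*(set(line) for line in group)) per group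
def pvInterGroup (g : List String) : List String :=
  g.foldl (fun acc line => PySem.Set.inter acc (PySem.Set.ofList (pvChars line))) pvAlphabet

def clean_group_forms_alt (input_data : List String) : List (List String) :=
  (pvGroups (input_data ++ [""]) []).map pvInterGroup

-- ===== PRECONDITION & SPEC =====
def Spec_clean_group_forms (input_data : List String) (out : List (List String)) : Prop := out = clean_group_forms_alt input_data
instance (input_data : List String) (out : List (List String)) : Decidable (Spec_clean_group_forms input_data out) := by unfold Spec_clean_group_forms; infer_instance

-- ===== CLAIM (what is proved, stated in full; the proofs are below) =====
def Claim_equal_clean_group_forms : Prop := ∀ (input_data : List String), Dom_clean_group_forms input_data → Spec_clean_group_forms input_data (clean_group_forms input_data)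

-- ===== LEMMAS AND PROOFS =====

-- invariant: A's fold, started with the intersection `acc` already accumulated over `current`,
-- produces `out` followed by B's per-group intersections of the remaining groups
theorem pv_key (xs : List String) (out : List (List String)) (acc : List String)
    (current : List String) (hacc : acc = pvInterGroup current) :
    (xs.foldl
      (fun (st : List (List String) × List String) i =>
        if PySem.Str.len i > 0 then
          (st.1, PySem.Set.inter st.2 (PySem.Set.ofList (pvChars i)))
        else
          (st.1 ++ [st.2], pvAlphabet))
      (out, acc)).1
    = out ++ (pvGroups xs current).map pvInterGroup := by
  induction xs generalizing out acc current with
  | nil => simp [pvGroups]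
  | cons i rest ih =>
    by_cases h : PySem.Str.len i > 0
    · simp only [List.foldl_cons, pvGroups, if_pos h]
      exact ih _ _ (current ++ [i]) (by subst hacc; simp [pvInterGroup])
    · simp only [List.foldl_cons, pvGroups, if_neg h]
      rw [ih (out ++ [acc]) pvAlphabet [] (by simp [pvInterGroup]), hacc]
      simp

-- ===== VERDICT (by name: the statement is the Claim_ definition above) =====
theorem clean_group_forms_spec : Claim_equal_clean_group_forms := by
  intro input_data _
  show clean_group_forms input_data = clean_group_forms_alt input_data
  unfold clean_group_forms clean_group_forms_alt
  rw [pv_key _ [] pvAlphabet [] (by simp [pvInterGroup])]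
  simp
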